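-- pv_equiv track=rewrite | github.com/daniel-reich/ubiquitous-fiesta | hZ4HzhboCJ5dDiNve_6.py | special_reverse_string
-- ===== SOURCE A (Python) =====
-- def special_reverse_string(txt):
--   res = ''
--   rev = [x for x in txt if x!=' ']
--   for x in range(len(txt)):
--     if txt[x]==' ': res+=' '
--     elif txt[x].isupper():
--       res+= rev.pop().upper()
--     else:
--       res+= rev.pop().lower()
--   return res
-- ===== SOURCE B (Python) =====
-- def special_reverse_string(txt):
--   s = list(txt)
--   i, j = 0, len(s) - 1
--   while i < j:
--     if s[i] == ' ':
--       i += 1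
--     elif s[j] == ' ':
--       j -= 1
--     else:
--       s[i], s[j] = s[j], s[i]
--       i += 1
--       j -= 1
--   return ''.join(' ' if o == ' ' else (c.upper() if o.isupper() else c.lower())
--                  for c, o in zip(s, txt))
-- ===== Notes on version B (the rewrite author's own statement) =====
-- stated objective: alternative
-- what changed: B reverses the non-space characters in place with a two-pointer swap (skipping spaces from both ends) and then recases each position from the original string in one zip pass, instead of A's filtered copy consumed by repeated pop() while rebuilding the string.
import Mathlib
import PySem

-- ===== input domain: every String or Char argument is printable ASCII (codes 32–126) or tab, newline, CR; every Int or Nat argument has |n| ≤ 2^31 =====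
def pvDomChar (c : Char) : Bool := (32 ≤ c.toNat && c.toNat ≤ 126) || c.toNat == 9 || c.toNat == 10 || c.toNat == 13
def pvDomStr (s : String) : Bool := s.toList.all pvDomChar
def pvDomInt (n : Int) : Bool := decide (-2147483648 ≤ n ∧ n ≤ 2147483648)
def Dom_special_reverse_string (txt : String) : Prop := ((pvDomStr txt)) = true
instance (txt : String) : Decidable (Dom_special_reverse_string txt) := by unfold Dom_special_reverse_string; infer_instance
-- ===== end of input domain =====

-- B reverses the non-space chars with an in-place two-pointer swap plus one recasing zip pass,
-- instead of A's filtered copy consumed by pop(); alternative algorithm, same cost.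

-- ===== PORT A =====
-- A's loop over the characters of txt, threading the 'rev' list that pop() consumes from the end.
-- The 'none' branches correspond to rev.pop() on an empty list (IndexError); they are unreachable
-- because rev holds exactly one char per non-space position.
def pvALoop : List Char → List Char → List Char
  | [], _ => []
  | c :: rest, rev =>
    if c = ' ' then ' ' :: pvALoop rest rev
    else if PySem.Chars.isupper c then
      match PySem.List.pop? rev (-1) with
      | some (d, rev') => PySem.Chars.upperChar d :: pvALoop rest rev'
      | none => []
    else
      match PySem.List.pop? rev (-1) with
      | some (d, rev') => PySem.Chars.lowerChar d :: pvALoop rest rev'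
      | none => []

def special_reverse_string (txt : String) : String :=
  String.mk (pvALoop txt.toList (txt.toList.filter (fun x => x ≠ ' ')))

-- ===== PORT B =====
-- while i < j: skip spaces from either end, else swap s[i], s[j]
def pvTpLoop (s : List Char) (i j : Nat) : List Char :=
  if i < j then
    if s.getD i ' ' = ' ' then pvTpLoop s (i + 1) j
    else if s.getD j ' ' = ' ' then pvTpLoop s i (j - 1)
    else pvTpLoop ((s.set i (s.getD j ' ')).set j (s.getD i ' ')) (i + 1) (j - 1)
  else s
termination_by j - i

def special_reverse_string_alt (txt : String) : String :=
  String.mk (List.zipWith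
    (fun c o => if o = ' ' then ' '
                else if PySem.Chars.isupper o then PySem.Chars.upperChar c
                else PySem.Chars.lowerChar c)
    (pvTpLoop txt.toList 0 (txt.toList.length - 1)) txt.toList)

-- ===== PRECONDITION & SPEC =====
def Spec_special_reverse_string (txt : String) (out : String) : Prop :=
  out = special_reverse_string_alt txt
instance (txt : String) (out : String) : Decidable (Spec_special_reverse_string txt out) := by
  unfold Spec_special_reverse_string; infer_instance

-- ===== CLAIM =====
def Claim_equal_special_reverse_string : Prop :=
  ∀ (txt : String), Dom_special_reverse_string txt →
    Spec_special_reverse_string txt (special_reverse_string txt)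

-- ===== LEMMAS AND PROOFS =====

-- place the chars of cs into the non-space slots of l, left to right; returns leftover cs
def pvFill : List Char → List Char → List Char × List Char
  | [], cs => ([], cs)
  | c :: t, cs =>
    if c = ' ' then
      let p := pvFill t cs
      (' ' :: p.1, p.2)
    else
      match cs with
      | [] => (c :: t, [])
      | d :: ds =>
        let p := pvFill t ds
        (d :: p.1, p.2)

def pvCnt (l : List Char) : Nat := (l.filter (fun x => x ≠ ' ')).length

lemma pvFill_exact : ∀ (l cs ds : List Char), cs.length = pvCnt l →
    pvFill l (cs ++ ds) = ((pvFill l cs).1, ds) := by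
  intro l
  induction l with
  | nil =>
    intro cs ds h
    simp [pvCnt] at h
    simp [h, pvFill]
  | cons c t ih =>
    intro cs ds h
    by_cases hc : c = ' '
    · simp [pvFill, hc, ih cs ds (by simpa [pvCnt, hc] using h)]
    · have hcnt : pvCnt (c :: t) = pvCnt t + 1 := by simp [pvCnt, hc]
      rw [hcnt] at h
      cases cs with
      | nil => simp at h
      | cons d ds' =>
        simp at h
        simp [pvFill, hc, ih ds' ds h]

lemma pvFill_nil_cs (l : List Char) : pvFill l [] = (l, []) := by
  induction l with
  | nil => rfl
  | cons c t ih =>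
    by_cases hc : c = ' '
    · simp [pvFill, hc, ih]
    · simp [pvFill, hc]

lemma pvFill_append (l1 l2 cs : List Char) :
    pvFill (l1 ++ l2) cs =
      ((pvFill l1 cs).1 ++ (pvFill l2 (pvFill l1 cs).2).1,
        (pvFill l2 (pvFill l1 cs).2).2) := by
  induction l1 generalizing cs with
  | nil => simp [pvFill]
  | cons c t ih =>
    by_cases hc : c = ' '
    · simp [pvFill, hc, ih]
    · cases cs with
      | nil => simp [pvFill, hc, pvFill_nil_cs]
      | cons d ds => simp [pvFill, hc, ih]

lemma pvGetD_append_len (p l : List Char) (d : Char) :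
    (p ++ l).getD p.length d = l.getD 0 d := by
  induction p with
  | nil => rfl
  | cons x xs ih => simpa using ih

lemma pvSet_append_len (p : List Char) (c : Char) (l : List Char) (v : Char) :
    (p ++ c :: l).set p.length v = p ++ v :: l := by
  induction p with
  | nil => rfl
  | cons x xs ih => simpa using ih

lemma pvTp_correct : ∀ (n : Nat) (pre mid suf : List Char), mid.length = n →
    pvTpLoop (pre ++ mid ++ suf) pre.length (pre.length + mid.length - 1) =
      pre ++ (pvFill mid ((mid.filter (fun x => x ≠ ' ')).reverse)).1 ++ suf := by
  intro n
  induction n using Nat.strong_induction_on with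
  | _ n ih =>
    intro pre mid suf hlen
    rcases mid with _ | ⟨a, rest⟩
    · rw [pvTpLoop, if_neg (by simp)]
      simp [pvFill]
    rcases List.eq_nil_or_concat rest with rfl | ⟨m, b, rfl⟩
    · rw [pvTpLoop, if_neg (by simp)]
      by_cases ha : a = ' ' <;> simp [pvFill, ha]
    rw [List.concat_eq_append] at hlen ⊢
    have hn : n = m.length + 2 := by simpa using hlen.symm
    have hij : pre.length < pre.length + (a :: (m ++ [b])).length - 1 := by
      simp; try omega
    rw [pvTpLoop, if_pos hij]
    have hga : (pre ++ (a :: (m ++ [b])) ++ suf).getD pre.length ' ' = a := by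
      rw [List.append_assoc, pvGetD_append_len]; rfl
    rw [hga]
    by_cases ha : a = ' '
    · rw [if_pos ha]
      subst ha
      have hs : pre ++ (' ' :: (m ++ [b])) ++ suf = (pre ++ [' ']) ++ (m ++ [b]) ++ suf := by
        simp
      have hj : pre.length + (' ' :: (m ++ [b])).length - 1
          = (pre ++ [' ']).length + (m ++ [b]).length - 1 := by simp; try omega
      rw [hs, hj, show pre.length + 1 = (pre ++ [' ']).length by simp,
        ih (n - 1) (by omega) (pre ++ [' ']) (m ++ [b]) suf (by simp; try omega)]
      simp [pvFill]
    · rw [if_neg ha]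
      have hgb : (pre ++ (a :: (m ++ [b])) ++ suf).getD
          (pre.length + (a :: (m ++ [b])).length - 1) ' ' = b := by
        rw [show pre ++ (a :: (m ++ [b])) ++ suf = (pre ++ a :: m) ++ ([b] ++ suf) by simp,
          show pre.length + (a :: (m ++ [b])).length - 1 = (pre ++ a :: m).length by simp; try omega,
          pvGetD_append_len]
        rfl
      rw [hgb]
      by_cases hb : b = ' '
      · rw [if_pos hb]
        subst hb
        have hs : pre ++ (a :: (m ++ [' '])) ++ suf = pre ++ (a :: m) ++ (' ' :: suf) := by
          simp
        have hj : pre.length + (a :: (m ++ [' '])).length - 1 - 1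
            = pre.length + (a :: m).length - 1 := by simp; try omega
        rw [hs, hj, ih (n - 1) (by omega) pre (a :: m) (' ' :: suf) (by simp; try omega)]
        have hcs : ((a :: (m ++ [' '])).filter (fun x => x ≠ ' ')).reverse
            = ((a :: m).filter (fun x => x ≠ ' ')).reverse := by
          rw [show a :: (m ++ [' ']) = (a :: m) ++ [' '] by simp, List.filter_append]
          simp
        rw [hcs]
        have hex := pvFill_exact (a :: m) (((a :: m).filter (fun x => x ≠ ' ')).reverse)
          [] (by simp [pvCnt])
        have happ := pvFill_append (a :: m) [' ']
          (((a :: m).filter (fun x => x ≠ ' ')).reverse)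
        simp only [List.append_nil] at hex
        rw [show (a :: (m ++ [' '])) = (a :: m) ++ [' '] by simp, happ, hex]
        simp [pvFill]
      · rw [if_neg hb]
        have hset : ((pre ++ (a :: (m ++ [b])) ++ suf).set pre.length b).set
            (pre.length + (a :: (m ++ [b])).length - 1) a
            = (pre ++ [b]) ++ m ++ (a :: suf) := by
          rw [show pre ++ (a :: (m ++ [b])) ++ suf = pre ++ a :: ((m ++ [b]) ++ suf) by simp,
            pvSet_append_len,
            show pre ++ b :: ((m ++ [b]) ++ suf) = (pre ++ b :: m) ++ b :: suf by simp,
            show pre.length + (a :: (m ++ [b])).length - 1 = (pre ++ b :: m).length by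
              simp; try omega,
            pvSet_append_len]
          simp
        have hj : pre.length + (a :: (m ++ [b])).length - 1 - 1
            = (pre ++ [b]).length + m.length - 1 := by simp; try omega
        rw [hset, hj, show pre.length + 1 = (pre ++ [b]).length by simp,
          ih (n - 2) (by omega) (pre ++ [b]) m (a :: suf) (by omega)]
        have hfil : ((a :: (m ++ [b])).filter (fun x => x ≠ ' ')).reverse
            = b :: ((m.filter (fun x => x ≠ ' ')).reverse ++ [a]) := by
          simp [ha, hb]
        rw [hfil]
        have hex := pvFill_exact m ((m.filter (fun x => x ≠ ' ')).reverse)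
          [a] (by simp [pvCnt])
        have happ := pvFill_append m [b] ((m.filter (fun x => x ≠ ' ')).reverse ++ [a])
        rw [show (a :: (m ++ [b])) = a :: (m ++ [b]) from rfl]
        simp only [pvFill, if_neg ha]
        rw [show m ++ [b] = m ++ [b] from rfl] at happ
        rw [happ, hex]
        simp [pvFill, hb]

lemma pvALoop_eq : ∀ (l rev : List Char), rev.length = pvCnt l →
    pvALoop l rev =
      List.zipWith
        (fun c o => if o = ' ' then ' '
                    else if PySem.Chars.isupper o then PySem.Chars.upperChar c
                    else PySem.Chars.lowerChar c)
        ((pvFill l rev.reverse).1) l := by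
  intro l
  induction l with
  | nil => intro rev h; simp [pvALoop, pvFill]
  | cons c t ih =>
    intro rev h
    by_cases hc : c = ' '
    · have h' : rev.length = pvCnt t := by simpa [pvCnt, hc] using h
      simp [pvALoop, pvFill, hc, ih rev h']
    · have hne : rev ≠ [] := by
        intro hr
        rw [hr] at h
        simp [pvCnt, hc] at h
      rcases List.eq_nil_or_concat rev with hr | ⟨rs, d, rfl⟩
      · exact absurd hr hne
      · rw [List.concat_eq_append] at h ⊢
        have h' : rs.length = pvCnt t := by
          have : rs.length + 1 = pvCnt t + 1 := by simpa [pvCnt, hc] using h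
          omega
        rw [show (rs ++ [d]).reverse = d :: rs.reverse by simp]
        simp only [pvALoop, pvFill, hc, PySem.List.pop?_last]
        by_cases hu : PySem.Chars.isupper c
        · simp [hu, hc, ih rs h']
        · simp [hu, hc, ih rs h']

-- ===== VERDICT =====
theorem special_reverse_string_spec : Claim_equal_special_reverse_string := by
  intro txt _
  unfold Spec_special_reverse_string special_reverse_string special_reverse_string_alt
  have hlen : (txt.toList.filter (fun x => x ≠ ' ')).length = pvCnt txt.toList := rfl
  have hA := pvALoop_eq txt.toList (txt.toList.filter (fun x => x ≠ ' ')) hlen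
  have hB := pvTp_correct txt.toList.length [] txt.toList [] rfl
  simp only [List.nil_append, List.append_nil, List.length_nil, Nat.zero_add] at hB
  rw [hA, hB]
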